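-- pv_equiv track=rewrite | github.com/filliptm/ComfyUI_Fill-Nodes | nodes/FL_PromptMulti.py | process_prompts
-- ===== SOURCE A (Python) =====
-- def process_prompts(positive_text, negative_text, name_prefix="prompt_"):
--     # Split the input texts by newlines
--     positive_prompts = [p.strip() for p in positive_text.split('\n') if p.strip()]
--     negative_prompts = [n.strip() for n in negative_text.split('\n') if n.strip()]
--
--     # Ensure we have matching numbers of prompts
--     # If not, repeat the last one or use empty string
--     if len(positive_prompts) < len(negative_prompts):
--         if len(positive_prompts) > 0:
--             positive_prompts.extend([positive_prompts[-1]] * (len(negative_prompts) - len(positive_prompts)))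
--         else:
--             positive_prompts = [""] * len(negative_prompts)
--     elif len(negative_prompts) < len(positive_prompts):
--         if len(negative_prompts) > 0:
--             negative_prompts.extend([negative_prompts[-1]] * (len(positive_prompts) - len(negative_prompts)))
--         else:
--             negative_prompts = [""] * len(positive_prompts)
--
--     # Create output lists
--     positives = []
--     negatives = []
--     names = []
--
--     for i, (pos, neg) in enumerate(zip(positive_prompts, negative_prompts)):
--         name = f"{name_prefix}{i+1}"
--         positives.append(pos)
--         negatives.append(neg)
--         names.append(name)
--
--     return (positives, negatives, names)
-- ===== SOURCE B (Python) =====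
-- def process_prompts(positive_text, negative_text, name_prefix="prompt_"):
--     # One streaming pass carrying last-seen values; no padding lists, no zip.
--     pos = [p.strip() for p in positive_text.split('\n') if p.strip()]
--     neg = [n.strip() for n in negative_text.split('\n') if n.strip()]
--     positives, negatives, names = [], [], []
--     last_p, last_n, k = "", "", 0
--     while k < len(pos) or k < len(neg):
--         if k < len(pos):
--             last_p = pos[k]
--         if k < len(neg):
--             last_n = neg[k]
--         positives.append(last_p)
--         negatives.append(last_n)
--         names.append(f"{name_prefix}{k + 1}")
--         k += 1
--     return (positives, negatives, names)
-- ===== Notes on version B (the rewrite author's own statement) =====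
-- stated objective: simpler
-- what changed: Replaces A's staged pad-then-zip (if/elif extend blocks materializing padded lists, then an enumerate(zip) loop) with one streaming while-loop that carries last-seen values and never builds padded lists.
import Mathlib
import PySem

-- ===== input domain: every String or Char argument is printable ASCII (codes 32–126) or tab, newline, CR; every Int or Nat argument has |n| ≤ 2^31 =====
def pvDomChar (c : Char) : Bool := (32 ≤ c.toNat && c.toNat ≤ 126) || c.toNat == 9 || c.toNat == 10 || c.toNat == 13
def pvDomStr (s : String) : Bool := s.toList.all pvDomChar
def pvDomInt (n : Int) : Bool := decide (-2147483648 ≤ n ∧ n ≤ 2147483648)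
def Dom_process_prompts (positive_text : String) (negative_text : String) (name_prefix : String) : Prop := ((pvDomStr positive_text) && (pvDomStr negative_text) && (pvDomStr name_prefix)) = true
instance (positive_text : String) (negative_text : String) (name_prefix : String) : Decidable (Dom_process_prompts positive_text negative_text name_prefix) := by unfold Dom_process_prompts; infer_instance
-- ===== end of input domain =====

-- B replaces A's staged pad-then-zip (extend blocks materializing padded lists, then an
-- enumerate(zip) loop) with one streaming while-loop carrying last-seen values: simpler, same cost.

-- shared first step of both Pythons: [s.strip() for s in t.split('\n') if s.strip()]
def pvClean (t : String) : List String :=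
  (((PySem.Str.split? t "\n").getD []).map PySem.Str.strip).filter (fun s => !(s == ""))

-- ===== PORT A =====
def process_prompts (positive_text : String) (negative_text : String) (name_prefix : String) : List String × List String × List String :=
  let pos0 := pvClean positive_text
  let neg0 := pvClean negative_text
  let pos :=
    if pos0.length < neg0.length then
      (if 0 < pos0.length then
        pos0 ++ List.replicate (neg0.length - pos0.length) (PySem.List.pyGetD pos0 (-1) "")
      else List.replicate neg0.length "")
    else pos0
  let neg :=
    if neg0.length < pos.length then
      (if 0 < neg0.length then
        neg0 ++ List.replicate (pos.length - neg0.length) (PySem.List.pyGetD neg0 (-1) "")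
      else List.replicate pos.length "")
    else neg0
  (PySem.List.enumerate (pos.zip neg) 0).foldl
    (fun acc x =>
      (acc.1 ++ [x.2.1], acc.2.1 ++ [x.2.2], acc.2.2 ++ [name_prefix ++ PySem.Int.toStr (x.1 + 1)]))
    ([], [], [])

-- ===== PORT B =====
-- B's while-loop: condition 'k < len(pos) or k < len(neg)', two conditional updates of the
-- carried last-seen values, three appends, k += 1.
def pvBLoop (np : String) (pos neg : List String) (k : Nat) (lp ln : String)
    (ps ns nm : List String) : List String × List String × List String :=
  if h : k < pos.length ∨ k < neg.length then
    let lp' := if k < pos.length then pos.getD k "" else lp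
    let ln' := if k < neg.length then neg.getD k "" else ln
    pvBLoop np pos neg (k + 1) lp' ln'
      (ps ++ [lp']) (ns ++ [ln']) (nm ++ [np ++ PySem.Int.toStr ((k : Int) + 1)])
  else (ps, ns, nm)
termination_by pos.length + neg.length - k
decreasing_by omega

def process_prompts_alt (positive_text : String) (negative_text : String) (name_prefix : String) : List String × List String × List String :=
  let pos := pvClean positive_text
  let neg := pvClean negative_text
  pvBLoop name_prefix pos neg 0 "" "" [] [] []

-- ===== PRECONDITION & SPEC =====
def Spec_process_prompts (positive_text : String) (negative_text : String) (name_prefix : String) (out : List String × List String × List String) : Prop := out = process_prompts_alt positive_text negative_text name_prefix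
instance (positive_text : String) (negative_text : String) (name_prefix : String) (out : List String × List String × List String) : Decidable (Spec_process_prompts positive_text negative_text name_prefix out) := by unfold Spec_process_prompts; infer_instance

-- ===== CLAIM (what is proved, stated in full; the proofs are below) =====
def Claim_equal_process_prompts : Prop := ∀ (positive_text : String) (negative_text : String) (name_prefix : String), Dom_process_prompts positive_text negative_text name_prefix → Spec_process_prompts positive_text negative_text name_prefix (process_prompts positive_text negative_text name_prefix)

-- ===== LEMMAS AND PROOFS =====

-- the value B's loop emits at position k (and the element-wise reading of A's padded lists)
def pvG (p : List String) (k : Nat) : String :=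
  if k < p.length then p.getD k "" else p.getLastD ""

-- characterization of B's loop: starting at k with correctly carried last-seen values it
-- appends the pvG values of positions k, k+1, … up to max length.
theorem pv_bloop (np : String) (pos neg : List String) :
    ∀ (n k : Nat) (lp ln : String) (ps ns nm : List String),
      max pos.length neg.length - k = n →
      (pos.length ≤ k → lp = pos.getLastD "") →
      (neg.length ≤ k → ln = neg.getLastD "") →
      pvBLoop np pos neg k lp ln ps ns nm =
        (ps ++ (List.range' k n).map (pvG pos),
         ns ++ (List.range' k n).map (pvG neg),
         nm ++ (List.range' k n).map (fun j => np ++ PySem.Int.toStr ((j : Int) + 1))) := by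
  intro n
  induction n with
  | zero =>
      intro k lp ln ps ns nm hn _ _
      rw [pvBLoop]
      rw [dif_neg (by omega)]
      simp
  | succ n ih =>
      intro k lp ln ps ns nm hn hlp hln
      have hk : k < pos.length ∨ k < neg.length := by omega
      rw [pvBLoop, dif_pos hk]
      have hglp : (if k < pos.length then pos.getD k "" else lp) = pvG pos k := by
        unfold pvG
        by_cases h : k < pos.length
        · simp [h]
        · simp [h, hlp (by omega)]
      have hgln : (if k < neg.length then neg.getD k "" else ln) = pvG neg k := by
        unfold pvG
        by_cases h : k < neg.length
        · simp [h]
        · simp [h, hln (by omega)]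
      have hlast : ∀ (p : List String), p.length ≤ k + 1 → pvG p k = p.getLastD "" := by
        intro p hp
        unfold pvG
        by_cases h : k < p.length
        · have hk1 : p.length = k + 1 := by omega
          simp [List.getD, List.getLastD_eq_getLast?, List.getLast?_eq_getElem?, hk1]
        · simp [h]
      rw [ih (k + 1) _ _ _ _ _ (by omega)
            (fun h => by rw [hglp]; exact hlast pos h)
            (fun h => by rw [hgln]; exact hlast neg h)]
      rw [hglp, hgln, List.range'_succ]
      simp

-- A's append loop over enumerate(zip) returns the two projections plus the running names.
theorem pv_loop (np : String) (zs : List (String × String)) (s : Int) (a b c : List String) :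
    (PySem.List.enumerate zs s).foldl
      (fun acc (x : Int × String × String) =>
        (acc.1 ++ [x.2.1], acc.2.1 ++ [x.2.2], acc.2.2 ++ [np ++ PySem.Int.toStr (x.1 + 1)]))
      (a, b, c)
    = (a ++ zs.map Prod.fst, b ++ zs.map Prod.snd,
       c ++ (PySem.List.enumerate zs s).map (fun x => np ++ PySem.Int.toStr (x.1 + 1))) := by
  induction zs generalizing s a b c with
  | nil => simp [PySem.List.enumerate_nil]
  | cons z zs ih =>
      rw [PySem.List.enumerate_cons, List.foldl_cons, ih]
      simp

-- A's names over an enumerate equal an index comprehension.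
theorem pv_names (np : String) (zs : List (String × String)) :
    (PySem.List.enumerate zs 0).map (fun x => np ++ PySem.Int.toStr (x.1 + 1))
    = (List.range zs.length).map (fun k : Nat => np ++ PySem.Int.toStr ((k : Int) + 1)) := by
  rw [show (fun x : Int × String × String => np ++ PySem.Int.toStr (x.1 + 1))
        = (fun i : Int => np ++ PySem.Int.toStr (i + 1)) ∘ Prod.fst from rfl,
      ← List.map_map, PySem.List.map_fst_enumerate, PySem.List.pyRange_one]
  simp [Function.comp]

-- rephrase A's padding target length as L = max of the two lengths.
theorem pv_pad_shift (p : List String) (v : String) (n L : Nat) (hL : L = max p.length n) :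
    (if p.length < n then
      (if 0 < p.length then p ++ List.replicate (n - p.length) v else List.replicate n "")
    else p)
    = (if p.length < L then
      (if 0 < p.length then p ++ List.replicate (L - p.length) v else List.replicate L "")
    else p) := by
  by_cases hc : p.length < n
  · have : L = n := by omega
    subst this
    rfl
  · have h1 : ¬ p.length < L := by omega
    rw [if_neg hc, if_neg h1]

-- A's padding of one list to length L, element-wise equal to the pvG values.
theorem pv_pad (p : List String) (L : Nat) (h : p.length ≤ L) :
    (if p.length < L then
      (if 0 < p.length then
        p ++ List.replicate (L - p.length) (PySem.List.pyGetD p (-1) "")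
      else List.replicate L "")
    else p)
    = (List.range L).map (pvG p) := by
  by_cases h1 : p.length < L
  · by_cases h2 : 0 < p.length
    · rw [if_pos h1, if_pos h2]
      have hne : p ≠ [] := by
        intro h'
        simp [h'] at h2
      apply List.ext_getElem
      · simp; omega
      · intro k hk1 hk2
        simp only [List.getElem_map, List.getElem_range]
        unfold pvG
        by_cases h3 : k < p.length
        · rw [if_pos h3, List.getElem_append_left h3]
          simp [List.getD, List.getElem?_eq_getElem h3]
        · rw [if_neg h3, List.getElem_append_right (by omega)]
          simp [PySem.List.pyGetD_neg_one p "" hne, List.getLastD_eq_getLast?,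
                List.getLast?_eq_some_getLast hne]
    · rw [if_pos h1, if_neg h2]
      have hp : p = [] := List.length_eq_zero_iff.mp (by omega)
      subst hp
      apply List.ext_getElem
      · simp
      · intro k hk1 hk2
        simp [pvG]
  · have hL : p.length = L := by omega
    rw [if_neg h1]
    apply List.ext_getElem
    · simp [hL]
    · intro k hk1 hk2
      have h3 : k < p.length := by omega
      simp only [List.getElem_map, List.getElem_range]
      unfold pvG
      rw [if_pos h3]
      simp [List.getD, List.getElem?_eq_getElem h3]

theorem pv_main (positive_text negative_text name_prefix : String) :
    process_prompts positive_text negative_text name_prefix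
      = process_prompts_alt positive_text negative_text name_prefix := by
  simp only [process_prompts, process_prompts_alt]
  generalize pvClean positive_text = p
  generalize pvClean negative_text = q
  have hm : p.length ≤ max p.length q.length := le_max_left _ _
  have hn : q.length ≤ max p.length q.length := le_max_right _ _
  rw [pv_pad_shift p (PySem.List.pyGetD p (-1) "") q.length (max p.length q.length) rfl]
  have hppL : (if p.length < max p.length q.length then
      (if 0 < p.length then
        p ++ List.replicate (max p.length q.length - p.length) (PySem.List.pyGetD p (-1) "")
      else List.replicate (max p.length q.length) "")
    else p).length = max p.length q.length := by
    split_ifs <;> simp <;> omega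
  rw [hppL, pv_pad p _ hm, pv_pad q _ hn, pv_loop, pv_names,
      pv_bloop name_prefix p q (max p.length q.length) 0 "" "" [] [] []
        (by omega)
        (fun h => by
          have hp : p = [] := List.length_eq_zero_iff.mp (by omega)
          rw [hp]; rfl)
        (fun h => by
          have hq : q = [] := List.length_eq_zero_iff.mp (by omega)
          rw [hq]; rfl)]
  have hlen : ((List.range (max p.length q.length)).map (pvG p)).length
      = ((List.range (max p.length q.length)).map (pvG q)).length := by simp
  rw [List.map_fst_zip (le_of_eq hlen), List.map_snd_zip (le_of_eq hlen.symm), List.length_zip]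
  simp only [List.range_eq_range', List.length_map, List.length_range',
    min_self, List.nil_append, Prod.mk.injEq, true_and]
  generalize List.range' 0 (max p.length q.length) = l
  induction l with
  | nil => simp
  | cons a l ih => simp [ih]

-- ===== VERDICT (by name: the statement is the Claim_ definition above) =====
theorem process_prompts_spec : Claim_equal_process_prompts := by
  intro x y z _
  unfold Spec_process_prompts
  exact pv_main x y z
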